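-- pv_equiv track=rewrite | github.com/dradnats1012/Sparta-Batch | shard_map.py | assign_balanced
-- ===== SOURCE A (Python) =====
-- from heapq import heappush, heappop, heapify
--
-- def assign_balanced(pairs, shard_count, pinned: dict[str,int]):
--     """
--     pairs: List[(code, cnt)] 큰 순서로 들어오면 더 좋음
--     pinned: {code: shard_id} 선배치
--     return: assignments dict {code: shard_id}, totals dict {sid: sum}
--     """
--     # 최소힙: (sum, shard_id, list_codes)  — sum이 작은 샤드부터 배정
--     heap = [(0, sid, []) for sid in range(1, shard_count+1)]
--     heapify(heap)
--
--     assignments = {}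
--
--     # 1) 고정코드 선배치
--     for code, cnt in list(pairs):
--         if code in pinned:
--             sid = pinned[code]
--             # heap에서 해당 sid 찾아 sum 갱신
--             tmp = []
--             target = None
--             while heap:
--                 ssum, s, lst = heappop(heap)
--                 if s == sid:
--                     target = (ssum, s, lst)
--                     break
--                 tmp.append((ssum, s, lst))
--             for item in tmp:
--                 heappush(heap, item)
--             if target is None:
--                 # 이론상 발생X
--                 raise RuntimeError("Pinned shard not found in heap")
--
--             ssum, s, lst = target
--             lst.append((code, cnt))
--             heappush(heap, (ssum + cnt, s, lst))
--             assignments[code] = sid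
--             pairs.remove((code, cnt))
--
--     # 2) 나머지 그리디 배치
--     for code, cnt in pairs:
--         ssum, sid, lst = heappop(heap)
--         lst.append((code, cnt))
--         heappush(heap, (ssum + cnt, sid, lst))
--         assignments[code] = sid
--
--     # 샤드별 합계 계산
--     totals = {}
--     while heap:
--         ssum, sid, lst = heappop(heap)
--         totals[sid] = ssum
--     return assignments, totals
-- ===== SOURCE B (Python) =====
-- from heapq import heappush, heappop, heapify
--
-- def assign_balanced(pairs, shard_count, pinned: dict[str, int]):
--     # One pass splits pinned from the rest while accumulating pinned sums
--     # directly in a per-shard table; the greedy phase uses a heap of bare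
--     # (sum, shard_id) keys. (Does not mutate `pairs`, unlike the original.)
--     totals = {sid: 0 for sid in range(1, shard_count + 1)}
--     assignments = {}
--     rest = []
--     for code, cnt in pairs:
--         sid = pinned.get(code)
--         if sid is None:
--             rest.append((code, cnt))
--         else:
--             assignments[code] = sid
--             totals[sid] += cnt
--     heap = [(s, sid) for sid, s in totals.items()]
--     heapify(heap)
--     for code, cnt in rest:
--         s, sid = heappop(heap)
--         assignments[code] = sid
--         heappush(heap, (s + cnt, sid))
--     out_totals = {}
--     while heap:
--         s, sid = heappop(heap)
--         out_totals[sid] = s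
--     return assignments, out_totals
-- ===== Notes on version B (the rewrite author's own statement) =====
-- stated objective: alternative
-- what changed: A finds each pinned shard by repeatedly popping the whole heap of (sum,sid,codes) entries and pushing them back, and deletes each pinned pair with list.remove; B does one partition pass that accumulates pinned sums directly in a per-shard table and collects the unpinned rest, then runs the greedy phase on a heap of bare (sum,sid) keys.
import Mathlib
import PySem

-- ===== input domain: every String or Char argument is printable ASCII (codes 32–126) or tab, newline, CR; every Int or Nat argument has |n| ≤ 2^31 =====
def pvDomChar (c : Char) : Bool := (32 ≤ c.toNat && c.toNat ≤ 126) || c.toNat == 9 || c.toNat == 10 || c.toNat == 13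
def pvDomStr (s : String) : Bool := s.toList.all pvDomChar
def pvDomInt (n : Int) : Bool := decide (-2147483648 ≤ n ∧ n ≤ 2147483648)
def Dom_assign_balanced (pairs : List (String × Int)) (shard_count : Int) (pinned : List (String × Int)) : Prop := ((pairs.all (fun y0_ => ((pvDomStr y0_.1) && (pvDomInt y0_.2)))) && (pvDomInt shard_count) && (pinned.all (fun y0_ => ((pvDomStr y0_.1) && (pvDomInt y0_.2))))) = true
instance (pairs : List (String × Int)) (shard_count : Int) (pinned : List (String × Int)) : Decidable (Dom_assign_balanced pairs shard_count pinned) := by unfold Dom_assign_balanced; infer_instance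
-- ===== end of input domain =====

-- B replaces A's per-pinned-pair heap scan-and-rebuild and list.remove with one
-- partition pass over `pairs` accumulating pinned sums in a per-shard table; the
-- greedy heap holds bare (sum, sid) keys.  Return values only: A mutates `pairs`
-- in place (removes pinned entries), B does not.
--
-- heapq MODEL (both ports): Python's heap is consumed only through heappop = the
-- minimum under tuple order; the shard ids of the entries are pairwise distinct,
-- so (sum, shard_id) is a key with no ties (the third tuple component, A's code
-- list, is never compared) and heappop deterministically returns the unique
-- minimum.  The model — a list kept sorted by that key, heappush = ordered
-- insert, heappop = head, heapify = insertion sort — is exact for everything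
-- either program observes.

-- ===== PORT A =====
abbrev HEntry := Int × Int × List (String × Int)

-- shared model of heappush (both Pythons import it from heapq)
def heapPush {α : Type} (le : α → α → Bool) : List α → α → List α
  | [], e => [e]
  | x :: xs, e => if le x e then x :: heapPush le xs e else e :: x :: xs

-- Python tuple comparison on (sum, shard_id, _) — the list is never reached
def entryLE (a b : HEntry) : Bool := decide (a.1 < b.1) || (a.1 == b.1 && decide (a.2.1 ≤ b.2.1))

-- the `while heap:` scan of phase 1: pop until the pinned sid is found
def scanPopA (sid : Int) : List HEntry → List HEntry → Option (HEntry × List HEntry × List HEntry)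
  | [], _tmp => none
  | e :: h, tmp => if e.2.1 = sid then some (e, tmp, h) else scanPopA sid h (tmp ++ [e])

-- phase 1: `for code, cnt in list(pairs): if code in pinned: …`
-- (rem is the live `pairs` list that A mutates with pairs.remove)
def phase1A (pinned : PySem.Dict String Int) :
    List (String × Int) → List HEntry → PySem.Dict String Int → List (String × Int) →
    Option (List HEntry × PySem.Dict String Int × List (String × Int))
  | [], heap, asg, rem => some (heap, asg, rem)
  | (code, cnt) :: todo, heap, asg, rem =>
    match pinned.get? code with
    | none => phase1A pinned todo heap asg rem
    | some sid =>
      match scanPopA sid heap [] with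
      | none => none        -- raise RuntimeError("Pinned shard not found in heap")
      | some (t, tmp, h) =>
        let h1 := tmp.foldl (heapPush entryLE) h      -- push tmp items back
        let h2 := heapPush entryLE h1 (t.1 + cnt, t.2.1, t.2.2 ++ [(code, cnt)])
        match PySem.List.remove? rem (code, cnt) with
        | none => none      -- ValueError from pairs.remove (unreachable)
        | some rem' => phase1A pinned todo h2 (asg.insert code sid) rem'

-- phase 2: `for code, cnt in pairs: heappop; heappush`
def phase2A :
    List (String × Int) → List HEntry → PySem.Dict String Int →
    Option (List HEntry × PySem.Dict String Int)
  | [], heap, asg => some (heap, asg)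
  | _ :: _, [], _ => none   -- IndexError: heappop from empty heap
  | (code, cnt) :: rest, (ssum, sid, lst) :: h, asg =>
    phase2A rest (heapPush entryLE h (ssum + cnt, sid, lst ++ [(code, cnt)])) (asg.insert code sid)

-- `while heap: ssum, sid, lst = heappop(heap); totals[sid] = ssum`
def drainA : List HEntry → PySem.Dict Int Int → PySem.Dict Int Int
  | [], t => t
  | (ssum, sid, _) :: h, t => drainA h (t.insert sid ssum)

def assign_balanced (pairs : List (String × Int)) (shard_count : Int) (pinned : List (String × Int)) : (List (String × Int)) × (List (Int × Int)) :=
  let pd := PySem.Dict.ofList pinned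
  -- heap = [(0, sid, []) for sid in range(1, shard_count+1)]; heapify is a no-op
  -- in the model: the list is already sorted by (0, sid)
  let heap0 : List HEntry := (PySem.List.pyRange 1 (shard_count + 1) 1).map (fun sid => (0, sid, []))
  match phase1A pd pairs heap0 PySem.Dict.empty pairs with
  | none => ([], [])        -- RuntimeError, excluded by Pre_
  | some (h1, asg1, rem) =>
    match phase2A rem h1 asg1 with
    | none => ([], [])      -- IndexError, excluded by Pre_
    | some (h2, asg2) => (asg2.items, (drainA h2 PySem.Dict.empty).items)

-- ===== PORT B =====
-- key comparison for B's bare (sum, sid) heap entries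
def keyLE (a b : Int × Int) : Bool := decide (a.1 < b.1) || (a.1 == b.1 && decide (a.2 ≤ b.2))

-- the single partition pass: pinned → assignments + totals[sid] += cnt, rest appended
def splitB (pinned : PySem.Dict String Int) :
    List (String × Int) → PySem.Dict String Int → PySem.Dict Int Int → List (String × Int) →
    Option (PySem.Dict String Int × PySem.Dict Int Int × List (String × Int))
  | [], asg, totals, rest => some (asg, totals, rest)
  | (code, cnt) :: ps, asg, totals, rest =>
    match pinned.get? code with
    | none => splitB pinned ps asg totals (rest ++ [(code, cnt)])
    | some sid =>
      match totals.get? sid with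
      | none => none        -- KeyError from totals[sid] += cnt, excluded by Pre_
      | some s => splitB pinned ps (asg.insert code sid) (totals.insert sid (s + cnt)) rest

-- heapify = insertion sort in the sorted-list model
def heapifyB (l : List (Int × Int)) : List (Int × Int) := l.foldl (heapPush keyLE) []

def phase2B :
    List (String × Int) → List (Int × Int) → PySem.Dict String Int →
    Option (List (Int × Int) × PySem.Dict String Int)
  | [], heap, asg => some (heap, asg)
  | _ :: _, [], _ => none   -- IndexError: heappop from empty heap
  | (code, cnt) :: rest, (s, sid) :: h, asg =>
    phase2B rest (heapPush keyLE h (s + cnt, sid)) (asg.insert code sid)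

def drainB : List (Int × Int) → PySem.Dict Int Int → PySem.Dict Int Int
  | [], t => t
  | (s, sid) :: h, t => drainB h (t.insert sid s)

def assign_balanced_alt (pairs : List (String × Int)) (shard_count : Int) (pinned : List (String × Int)) : (List (String × Int)) × (List (Int × Int)) :=
  let pd := PySem.Dict.ofList pinned
  let totals0 : PySem.Dict Int Int :=
    (PySem.List.pyRange 1 (shard_count + 1) 1).foldl (fun d sid => d.insert sid 0) PySem.Dict.empty
  match splitB pd pairs PySem.Dict.empty totals0 [] with
  | none => ([], [])        -- KeyError, excluded by Pre_
  | some (asg, totals, rest) =>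
    let heap := heapifyB (totals.items.map (fun kv => (kv.2, kv.1)))
    match phase2B rest heap asg with
    | none => ([], [])      -- IndexError, excluded by Pre_
    | some (h, asg2) => (asg2.items, (drainB h PySem.Dict.empty).items)

-- ===== PRECONDITION & SPEC =====
-- Pre_ excludes exactly the inputs where A raises: a pair whose code is pinned to a
-- shard id outside 1..shard_count (RuntimeError), and a non-empty pairs list with
-- shard_count < 1 (heappop from an empty heap, IndexError).
def Pre_assign_balanced (pairs : List (String × Int)) (shard_count : Int) (pinned : List (String × Int)) : Prop :=
  (pairs ≠ [] → 1 ≤ shard_count) ∧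
  ∀ p ∈ pairs, ∀ sid ∈ (PySem.Dict.ofList pinned).get? p.1, 1 ≤ sid ∧ sid ≤ shard_count
instance (pairs : List (String × Int)) (shard_count : Int) (pinned : List (String × Int)) : Decidable (Pre_assign_balanced pairs shard_count pinned) := by unfold Pre_assign_balanced; infer_instance

def pvWitness_assign_balanced : (List (String × Int)) × Int × (List (String × Int)) :=
  ([("a", 3), ("b", 1), ("c", 2)], 2, [("a", 1)])

def Spec_assign_balanced (pairs : List (String × Int)) (shard_count : Int) (pinned : List (String × Int)) (out : (List (String × Int)) × (List (Int × Int))) : Prop := out = assign_balanced_alt pairs shard_count pinned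
instance (pairs : List (String × Int)) (shard_count : Int) (pinned : List (String × Int)) (out : (List (String × Int)) × (List (Int × Int))) : Decidable (Spec_assign_balanced pairs shard_count pinned out) := by unfold Spec_assign_balanced; infer_instance

-- ===== CLAIM (what is proved, stated in full; the proofs are below) =====
def Claim_equal_assign_balanced : Prop := ∀ (pairs : List (String × Int)) (shard_count : Int) (pinned : List (String × Int)), Dom_assign_balanced pairs shard_count pinned → Pre_assign_balanced pairs shard_count pinned → Spec_assign_balanced pairs shard_count pinned (assign_balanced pairs shard_count pinned)

-- ===== LEMMAS AND PROOFS =====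

-- projection of an A-entry to B's bare key
def projE (e : HEntry) : Int × Int := (e.1, e.2.1)

-- strict heap order on keys
def ltK (a b : Int × Int) : Prop := a.1 < b.1 ∨ (a.1 = b.1 ∧ a.2 < b.2)

-- ltK is a strict total order on keys with distinct second components
lemma ltK_trans {a b c : Int × Int} (h1 : ltK a b) (h2 : ltK b c) : ltK a c := by
  unfold ltK at *; omega

lemma ltK_asymm {a b : Int × Int} (h1 : ltK a b) (h2 : ltK b a) : False := by
  unfold ltK at *; omega

lemma ltK_or_of_snd_ne {a b : Int × Int} (h : a.2 ≠ b.2) : ltK a b ∨ ltK b a := by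
  unfold ltK; omega

lemma keyLE_false_iff {a b : Int × Int} : keyLE a b = false ↔ ltK b a := by
  simp [keyLE, ltK]; omega

lemma keyLE_true_of_ltK {a b : Int × Int} (h : ltK a b) : keyLE a b = true := by
  simp [keyLE]; unfold ltK at h; omega

lemma entryLE_eq_keyLE (a b : HEntry) : entryLE a b = keyLE (projE a) (projE b) := rfl

-- heapPush basics
lemma push_cons_of_le {α : Type} (le : α → α → Bool) {x e : α} (xs : List α)
    (h : le x e = true) : heapPush le (x :: xs) e = x :: heapPush le xs e := by
  simp [heapPush, h]

lemma push_cons_of_gt {α : Type} (le : α → α → Bool) {x e : α} (xs : List α)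
    (h : le x e = false) : heapPush le (x :: xs) e = e :: x :: xs := by
  simp [heapPush, h]

lemma push_perm {α : Type} (le : α → α → Bool) (h : List α) (e : α) :
    (heapPush le h e).Perm (e :: h) := by
  induction h with
  | nil => simp [heapPush]
  | cons x xs ih =>
    by_cases hc : le x e = true
    · rw [push_cons_of_le le xs hc]
      exact (ih.cons x).trans (List.Perm.swap e x xs)
    · rw [push_cons_of_gt le xs (by simpa using hc)]

lemma push_ne_nil {α : Type} (le : α → α → Bool) (h : List α) (e : α) :
    heapPush le h e ≠ [] := by
  cases h with
  | nil => simp [heapPush]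
  | cons x xs => by_cases hc : le x e = true
                 · rw [push_cons_of_le le xs hc]; simp
                 · rw [push_cons_of_gt le xs (by simpa using hc)]; simp

lemma push_proj (h : List HEntry) (e : HEntry) :
    (heapPush entryLE h e).map projE = heapPush keyLE (h.map projE) (projE e) := by
  induction h with
  | nil => rfl
  | cons x xs ih =>
    by_cases hc : entryLE x e = true
    · rw [push_cons_of_le entryLE xs hc, List.map_cons, ih, List.map_cons,
        push_cons_of_le keyLE (xs.map projE) (by rw [← entryLE_eq_keyLE]; exact hc)]
    · have hc' : entryLE x e = false := by simpa using hc
      rw [push_cons_of_gt entryLE xs hc', List.map_cons, List.map_cons,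
        push_cons_of_gt keyLE (xs.map projE) (by rw [← entryLE_eq_keyLE]; exact hc')]

lemma foldl_push_proj (l : List HEntry) (h : List HEntry) :
    (l.foldl (heapPush entryLE) h).map projE
      = (l.map projE).foldl (heapPush keyLE) (h.map projE) := by
  induction l generalizing h with
  | nil => rfl
  | cons x xs ih => simp only [List.foldl_cons, List.map_cons, ih, push_proj]

lemma push_pairwise (h : List (Int × Int)) (e : Int × Int) (hp : h.Pairwise ltK)
    (hc : ∀ x ∈ h, ltK x e ∨ ltK e x) : (heapPush keyLE h e).Pairwise ltK := by
  induction h with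
  | nil => simp [heapPush]
  | cons x xs ih =>
    rw [List.pairwise_cons] at hp
    by_cases hle : keyLE x e = true
    · rw [push_cons_of_le keyLE xs hle, List.pairwise_cons]
      have hxe : ltK x e := by
        rcases hc x (by simp) with h' | h'
        · exact h'
        · exact absurd (keyLE_false_iff.mpr h') (by simp [hle])
      refine ⟨fun y hy => ?_, ih hp.2 (fun y hy => hc y (by simp [hy]))⟩
      rcases List.mem_cons.mp ((push_perm keyLE xs e).mem_iff.mp hy) with heq | hy'
      · rw [heq]; exact hxe
      · exact hp.1 y hy'
    · have hf : keyLE x e = false := by simpa using hle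
      have hex : ltK e x := keyLE_false_iff.mp hf
      rw [push_cons_of_gt keyLE xs hf, List.pairwise_cons]
      refine ⟨fun y hy => ?_, List.pairwise_cons.mpr hp⟩
      rcases List.mem_cons.mp hy with heq | hy'
      · rw [heq]; exact hex
      · exact ltK_trans hex (hp.1 y hy')

lemma foldl_push_cons_min (l : List (Int × Int)) (t : Int × Int)
    (hmin : ∀ p ∈ l, ltK t p) : ∀ suf,
    l.foldl (heapPush keyLE) (t :: suf) = t :: l.foldl (heapPush keyLE) suf := by
  induction l with
  | nil => intro suf; rfl
  | cons p l' ih =>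
    intro suf
    rw [List.foldl_cons, push_cons_of_le keyLE suf (keyLE_true_of_ltK (hmin p (by simp))),
      List.foldl_cons]
    exact ih (fun q hq => hmin q (by simp [hq])) _

lemma foldl_push_front (pre : List (Int × Int)) : ∀ suf,
    (pre ++ suf).Pairwise ltK → pre.foldl (heapPush keyLE) suf = pre ++ suf := by
  induction pre with
  | nil => intro suf _; rfl
  | cons t pre' ih =>
    intro suf hp
    rw [List.cons_append, List.pairwise_cons] at hp
    have hpush : heapPush keyLE suf t = t :: suf := by
      cases suf with
      | nil => rfl
      | cons y ys =>
        exact push_cons_of_gt keyLE ys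
          (keyLE_false_iff.mpr (hp.1 y (by simp)))
    rw [List.foldl_cons, hpush,
      foldl_push_cons_min pre' t (fun p hpm => hp.1 p (by simp [hpm])) suf,
      ih suf hp.2]
    rfl

-- scanPopA finds the (unique) entry with the pinned sid
lemma scanPopA_spec (sid : Int) (pre : List HEntry) (e : HEntry) (suf : List HEntry)
    (he : e.2.1 = sid) (hpre : ∀ x ∈ pre, x.2.1 ≠ sid) :
    ∀ tmp, scanPopA sid (pre ++ e :: suf) tmp = some (e, tmp ++ pre, suf) := by
  induction pre with
  | nil => intro tmp; simp [scanPopA, he]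
  | cons x xs ih =>
    intro tmp
    have hx : ¬ x.2.1 = sid := hpre x (by simp)
    simp only [List.cons_append, scanPopA, if_neg hx]
    rw [ih (fun y hy => hpre y (by simp [hy])) (tmp ++ [x])]
    simp

-- pairs.remove removes the head occurrence when the accumulated rest is clean
lemma remove?_append_first (l1 l2 : List (String × Int)) (v : String × Int) (hv : v ∉ l1) :
    PySem.List.remove? (l1 ++ v :: l2) v = some (l1 ++ l2) := by
  induction l1 with
  | nil => simp
  | cons x xs ih =>
    have hx : x ≠ v := fun h => hv (by simp [h])
    rw [List.cons_append, PySem.List.remove?_cons_of_ne (xs ++ v :: l2) hx,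
      ih (fun h => hv (by simp [h]))]
    rfl

-- overwriting an existing key rewrites its item in place
lemma items_insert_existing (d : PySem.Dict Int Int) (sid s w : Int)
    (hnd : d.keys.Nodup) (hm : (sid, s) ∈ d.items) :
    ∃ il ir, d.items = il ++ (sid, s) :: ir ∧ (∀ p ∈ il, p.1 ≠ sid) ∧ (∀ p ∈ ir, p.1 ≠ sid) ∧
      (d.insert sid w).items = il ++ (sid, w) :: ir := by
  obtain ⟨il, ir, hdec⟩ := List.append_of_mem hm
  have hkeys : d.keys = il.map (·.1) ++ sid :: ir.map (·.1) := by
    simp [PySem.Dict.keys, hdec]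
  rw [hkeys] at hnd
  have hil : ∀ p ∈ il, p.1 ≠ sid := by
    intro p hp hps
    have hmem : sid ∈ il.map (·.1) := by rw [← hps]; exact List.mem_map_of_mem hp
    exact (List.nodup_append.mp hnd).2.2 sid hmem sid (by simp) rfl
  have hir : ∀ p ∈ ir, p.1 ≠ sid := by
    have := ((List.nodup_append.mp hnd).2.1)
    rw [List.nodup_cons] at this
    intro p hp hps
    exact this.1 (hps ▸ List.mem_map_of_mem hp)
  have hcont : d.contains sid = true :=
    (PySem.Dict.contains_iff_mem_keys d sid).mpr (by rw [hkeys]; simp)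
  refine ⟨il, ir, hdec, hil, hir, ?_⟩
  rw [PySem.Dict.items_insert_of_contains d w hcont, hdec]
  rw [List.map_append, List.map_cons]
  congr 1
  · exact (List.map_congr_left (fun p hp => by simp [hil p hp])).trans (List.map_id _)
  · congr 1
    · simp
    · exact (List.map_congr_left (fun p hp => by simp [hir p hp])).trans (List.map_id _)

-- phase 1 of A computes exactly B's partition pass (heap seen through projE)
lemma phase1_split (pinned : PySem.Dict String Int) :
    ∀ (todo : List (String × Int)) (heap : List HEntry) (asg : PySem.Dict String Int)
      (racc : List (String × Int)) (totals : PySem.Dict Int Int),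
    (heap.map projE).Pairwise ltK →
    (heap.map projE).Perm (totals.items.map (fun kv => (kv.2, kv.1))) →
    totals.keys.Nodup →
    (∀ p ∈ racc, pinned.get? p.1 = none) →
    (∀ p ∈ todo, ∀ sid ∈ pinned.get? p.1, sid ∈ totals.keys) →
    ∃ heap' asg' totals' rest',
      splitB pinned todo asg totals racc = some (asg', totals', rest') ∧
      phase1A pinned todo heap asg (racc ++ todo) = some (heap', asg', rest') ∧
      (heap'.map projE).Pairwise ltK ∧
      (heap'.map projE).Perm (totals'.items.map (fun kv => (kv.2, kv.1))) ∧
      totals'.keys = totals.keys ∧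
      rest'.Sublist (racc ++ todo) := by
  intro todo
  induction todo with
  | nil =>
    intro heap asg racc totals hpw hperm hnd hracc hpre
    exact ⟨heap, asg, totals, racc, rfl, by simp [phase1A], hpw, hperm, rfl, by simp⟩
  | cons p todo' ih =>
    intro heap asg racc totals hpw hperm hnd hracc hpre
    obtain ⟨code, cnt⟩ := p
    cases hget : pinned.get? code with
    | none =>
      obtain ⟨heap', asg', totals', rest', hsplit, hph1, h1, h2, h3, h4⟩ :=
        ih heap asg (racc ++ [(code, cnt)]) totals hpw hperm hnd
          (by intro q hq; rcases List.mem_append.mp hq with h | h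
              · exact hracc q h
              · simp at h; rw [h]; exact hget)
          (fun q hq => hpre q (by simp [hq]))
      refine ⟨heap', asg', totals', rest', ?_, ?_, h1, h2, h3, ?_⟩
      · simp only [splitB, hget]; exact hsplit
      · simp only [phase1A, hget]
        rw [show racc ++ (code, cnt) :: todo' = (racc ++ [(code, cnt)]) ++ todo' by simp]
        exact hph1
      · rw [show racc ++ (code, cnt) :: todo' = (racc ++ [(code, cnt)]) ++ todo' by simp]
        exact h4
    | some sid =>
      -- the pinned sid has an entry in totals and a matching heap entry
      have hsidk : sid ∈ totals.keys := hpre (code, cnt) (by simp) sid (by simp [hget])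
      have hcont : totals.contains sid = true :=
        (PySem.Dict.contains_iff_mem_keys totals sid).mpr hsidk
      obtain ⟨s, hs⟩ : ∃ s, totals.get? sid = some s := by
        have h1 := PySem.Dict.contains_eq_isSome_get? totals sid
        rw [hcont] at h1
        exact Option.isSome_iff_exists.mp h1.symm
      have hmemI : (sid, s) ∈ totals.items := PySem.Dict.mem_items_of_get?_eq_some totals hs
      have hmemP : (s, sid) ∈ heap.map projE :=
        hperm.symm.subset (List.mem_map_of_mem (f := fun kv => (kv.2, kv.1)) hmemI)
      obtain ⟨e, he_mem, he_proj⟩ := List.mem_map.mp hmemP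
      obtain ⟨hL, hR, hdec⟩ := List.append_of_mem he_mem
      have he1 : e.1 = s := congrArg Prod.fst he_proj
      have he2 : e.2.1 = sid := congrArg Prod.snd he_proj
      -- shard ids in the heap are pairwise distinct
      have hkeysdef : totals.items.map (·.1) = totals.keys := rfl
      have hsnd : ((heap.map projE).map (·.2)).Nodup := by
        refine ((hperm.map (fun x => x.2)).nodup_iff).mpr ?_
        rw [List.map_map]
        exact hkeysdef ▸ hnd
      have hsnd' : (hL.map (fun x => x.2.1) ++ sid :: hR.map (fun x => x.2.1)).Nodup := by
        rw [hdec] at hsnd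
        simpa [projE, he2, List.map_map, Function.comp] using hsnd
      have hLne : ∀ x ∈ hL, x.2.1 ≠ sid := by
        intro x hx hxs
        have hm2 : sid ∈ hL.map (fun x => x.2.1) := by rw [← hxs]; exact List.mem_map_of_mem hx
        exact (List.nodup_append.mp hsnd').2.2 sid hm2 sid (by simp) rfl
      have hRne : ∀ x ∈ hR, x.2.1 ≠ sid := by
        intro x hx hxs
        have h1 := (List.nodup_append.mp hsnd').2.1
        rw [List.nodup_cons] at h1
        exact h1.1 (by rw [← hxs]; exact List.mem_map_of_mem hx)
      have hscan := scanPopA_spec sid hL e hR he2 hLne []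
      -- projections of the two heap pieces
      have hpw' : ((hL.map projE) ++ projE e :: (hR.map projE)).Pairwise ltK := by
        rw [hdec] at hpw; simpa using hpw
      have hpw2 : ((hL.map projE) ++ (hR.map projE)).Pairwise ltK :=
        hpw'.sublist (List.Sublist.append_left (List.sublist_cons_self _ _) _)
      have hh1 : ((hL.foldl (heapPush entryLE) hR).map projE) = hL.map projE ++ hR.map projE := by
        rw [foldl_push_proj]; exact foldl_push_front _ _ hpw2
      have hprojnew : projE (e.1 + cnt, e.2.1, e.2.2 ++ [(code, cnt)]) = (s + cnt, sid) := by
        simp [projE, he1, he2]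
      have hh2 : ((heapPush entryLE (hL.foldl (heapPush entryLE) hR)
            (e.1 + cnt, e.2.1, e.2.2 ++ [(code, cnt)])).map projE)
          = heapPush keyLE (hL.map projE ++ hR.map projE) (s + cnt, sid) := by
        rw [push_proj, hh1, hprojnew]
      -- comparability of the new key with the remaining keys
      have hcomp : ∀ x ∈ hL.map projE ++ hR.map projE, ltK x (s + cnt, sid) ∨ ltK (s + cnt, sid) x := by
        intro x hx
        refine ltK_or_of_snd_ne ?_
        rcases List.mem_append.mp hx with hx' | hx' <;>
          obtain ⟨y, hy, rfl⟩ := List.mem_map.mp hx'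
        · exact hLne y hy
        · exact hRne y hy
      have hpw3 := push_pairwise _ _ hpw2 hcomp
      -- totals.insert rewrites the (sid, s) item in place
      obtain ⟨il, ir, hitems, hil, hir, hitems'⟩ :=
        items_insert_existing totals sid s (s + cnt) hnd hmemI
      have hperm1 : (hL.map projE ++ (s, sid) :: hR.map projE).Perm
          (il.map (fun kv => (kv.2, kv.1)) ++ (s, sid) :: ir.map (fun kv => (kv.2, kv.1))) := by
        have := hperm
        rw [hdec, hitems] at this
        simpa [he_proj] using this
      have hcore : (hL.map projE ++ hR.map projE).Perm
          (il.map (fun kv => (kv.2, kv.1)) ++ ir.map (fun kv => (kv.2, kv.1))) :=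
        (List.perm_middle.symm.trans (hperm1.trans List.perm_middle)).cons_inv
      have hperm3 : ((heapPush entryLE (hL.foldl (heapPush entryLE) hR)
            (e.1 + cnt, e.2.1, e.2.2 ++ [(code, cnt)])).map projE).Perm
          ((totals.insert sid (s + cnt)).items.map (fun kv => (kv.2, kv.1))) := by
        rw [hh2, hitems', List.map_append, List.map_cons]
        exact ((push_perm keyLE _ _).trans (hcore.cons _)).trans List.perm_middle.symm
      have hkeys' : (totals.insert sid (s + cnt)).keys = totals.keys :=
        PySem.Dict.keys_insert_of_contains totals (s + cnt) hcont
      -- pairs.remove removes the head occurrence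
      have hnotin : (code, cnt) ∉ racc := by
        intro hmem
        rw [hracc (code, cnt) hmem] at hget
        simp at hget
      have hrem := remove?_append_first racc todo' (code, cnt) hnotin
      obtain ⟨heap', asg', totals', rest', hsplit, hph1, h1, h2, h3, h4⟩ :=
        ih (heapPush entryLE (hL.foldl (heapPush entryLE) hR)
            (e.1 + cnt, e.2.1, e.2.2 ++ [(code, cnt)]))
          (asg.insert code sid) racc (totals.insert sid (s + cnt))
          (by rw [hh2]; exact hpw3) hperm3 (by rw [hkeys']; exact hnd) hracc
          (by intro q hq sid' hsid'
              rw [hkeys']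
              exact hpre q (by simp [hq]) sid' hsid')
      refine ⟨heap', asg', totals', rest', ?_, ?_, h1, h2, by rw [h3, hkeys'], h4.trans ?_⟩
      · simp only [splitB, hget, hs]; exact hsplit
      · simp only [phase1A, hget]
        rw [hdec, hscan]
        simp only [List.nil_append]
        rw [hrem]
        exact hph1
      · exact List.Sublist.append_left (List.sublist_cons_self _ _) racc

-- heapify = insertion sort: a sorted permutation of its input
lemma foldl_push_perm (l : List (Int × Int)) : ∀ acc, (l.foldl (heapPush keyLE) acc).Perm (acc ++ l) := by
  induction l with
  | nil => intro acc; simp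
  | cons x l' ih =>
    intro acc
    refine (ih (heapPush keyLE acc x)).trans ?_
    exact (((push_perm keyLE acc x).append_right l').trans List.perm_middle.symm)

lemma heapify_perm (l : List (Int × Int)) : (heapifyB l).Perm l := by
  simpa using foldl_push_perm l []

lemma foldl_push_pairwise (l : List (Int × Int)) : ∀ acc, acc.Pairwise ltK →
    ((acc ++ l).map (·.2)).Nodup → (l.foldl (heapPush keyLE) acc).Pairwise ltK := by
  induction l with
  | nil => intro acc h _; exact h
  | cons x l' ih =>
    intro acc hacc hnd
    have hp : (heapPush keyLE acc x ++ l').Perm (acc ++ x :: l') :=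
      ((push_perm keyLE acc x).append_right l').trans List.perm_middle.symm
    refine ih (heapPush keyLE acc x) ?_ ?_
    · refine push_pairwise _ _ hacc ?_
      intro y hy
      refine ltK_or_of_snd_ne ?_
      intro hyx
      have hy2 : y.2 ∈ acc.map (·.2) := List.mem_map_of_mem hy
      have hnd2 := hnd
      rw [List.map_append] at hnd2
      exact (List.nodup_append.mp hnd2).2.2 y.2 hy2 y.2 (by simp [hyx]) rfl
    · exact ((hp.map (·.2)).nodup_iff).mpr hnd

lemma sorted_unique {l1 l2 : List (Int × Int)} (hp : l1.Perm l2)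
    (h1 : l1.Pairwise ltK) (h2 : l2.Pairwise ltK) : l1 = l2 :=
  List.Perm.eq_of_pairwise (fun _ _ _ _ hab hba => (ltK_asymm hab hba).elim) h1 h2 hp

-- phase 2 of A seen through projE is exactly phase 2 of B
lemma phase2_agree : ∀ (rest : List (String × Int)) (h : List HEntry) (asg : PySem.Dict String Int),
    (rest = [] ∨ h ≠ []) →
    ∃ h2 asg2, phase2A rest h asg = some (h2, asg2) ∧
      phase2B rest (h.map projE) asg = some (h2.map projE, asg2) := by
  intro rest
  induction rest with
  | nil => intro h asg _; exact ⟨h, asg, rfl, rfl⟩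
  | cons p rest' ih =>
    intro h asg hne
    rcases hne with hne | hne
    · exact absurd hne (by simp)
    · cases h with
      | nil => exact absurd rfl hne
      | cons e t =>
        obtain ⟨code, cnt⟩ := p
        obtain ⟨ssum, sid, lst⟩ := e
        obtain ⟨h2, asg2, hA, hB⟩ := ih (heapPush entryLE t (ssum + cnt, sid, lst ++ [(code, cnt)]))
          (asg.insert code sid) (Or.inr (push_ne_nil _ _ _))
        refine ⟨h2, asg2, hA, ?_⟩
        rw [push_proj] at hB
        simpa [projE, phase2B] using hB

lemma drain_proj : ∀ (h : List HEntry) (d : PySem.Dict Int Int),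
    drainA h d = drainB (h.map projE) d := by
  intro h
  induction h with
  | nil => intro d; rfl
  | cons e t ih =>
    intro d
    obtain ⟨s, sid, lst⟩ := e
    simp only [drainA, List.map_cons, projE, drainB]
    exact ih _

theorem assign_balanced_spec : Claim_equal_assign_balanced := by
  intro pairs sc pinned _hdom hpre
  unfold Spec_assign_balanced
  obtain ⟨hsc, hpin⟩ := hpre
  -- the initial totals table and heap
  have htot0 : ((PySem.List.pyRange 1 (sc + 1) 1).foldl
        (fun d sid => d.insert sid (0:Int)) PySem.Dict.empty).items
      = (PySem.List.pyRange 1 (sc + 1) 1).map (fun sid => (sid, (0:Int))) := by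
    have h := PySem.Dict.items_foldl_insert_fresh (PySem.List.pyRange 1 (sc + 1) 1)
      (fun a => a) (fun _ => (0:Int)) PySem.Dict.empty
      (fun a _ => by simp) (by simpa using PySem.List.nodup_pyRange_one 1 (sc + 1))
    simpa using h
  have hkeys0 : ((PySem.List.pyRange 1 (sc + 1) 1).foldl
        (fun d sid => d.insert sid (0:Int)) PySem.Dict.empty).keys
      = PySem.List.pyRange 1 (sc + 1) 1 := by
    show (((PySem.List.pyRange 1 (sc + 1) 1).foldl
        (fun d sid => d.insert sid (0:Int)) PySem.Dict.empty).items.map (·.1)) = _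
    rw [htot0, List.map_map]
    exact (List.map_congr_left (fun a _ => rfl)).trans (List.map_id _)
  have hheap0 : (((PySem.List.pyRange 1 (sc + 1) 1).map
        (fun sid => ((0:Int), sid, ([] : List (String × Int))))).map projE)
      = (PySem.List.pyRange 1 (sc + 1) 1).map (fun sid => ((0:Int), sid)) := by
    rw [List.map_map]; rfl
  have hpw0 : ((((PySem.List.pyRange 1 (sc + 1) 1).map
        (fun sid => ((0:Int), sid, ([] : List (String × Int))))).map projE)).Pairwise ltK := by
    rw [hheap0]
    exact List.Pairwise.map _ (fun _ _ h => Or.inr ⟨rfl, h⟩)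
      (PySem.List.pairwise_lt_pyRange_one 1 (sc + 1))
  have hperm0 : ((((PySem.List.pyRange 1 (sc + 1) 1).map
        (fun sid => ((0:Int), sid, ([] : List (String × Int))))).map projE)).Perm
      ((((PySem.List.pyRange 1 (sc + 1) 1).foldl
        (fun d sid => d.insert sid (0:Int)) PySem.Dict.empty).items).map (fun kv => (kv.2, kv.1))) := by
    rw [hheap0, htot0, List.map_map]
    exact List.Perm.refl _
  obtain ⟨heap', asg', totals', rest', hsplit, hph1, hpw', hperm', hkeys', hsub⟩ :=
    phase1_split (PySem.Dict.ofList pinned) pairs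
      ((PySem.List.pyRange 1 (sc + 1) 1).map (fun sid => ((0:Int), sid, ([] : List (String × Int)))))
      PySem.Dict.empty []
      ((PySem.List.pyRange 1 (sc + 1) 1).foldl (fun d sid => d.insert sid (0:Int)) PySem.Dict.empty)
      hpw0 hperm0 (by rw [hkeys0]; exact PySem.List.nodup_pyRange_one 1 (sc + 1))
      (by intro p hp; cases hp)
      (by intro p hp sid hsid
          rw [hkeys0]
          obtain ⟨h1, h2⟩ := hpin p hp sid hsid
          exact PySem.List.mem_pyRange_one.mpr ⟨h1, by omega⟩)
  rw [List.nil_append] at hph1 hsub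
  -- B's heapify of the partitioned totals is A's heap after phase 1
  have hndk' : totals'.keys.Nodup := by
    rw [hkeys', hkeys0]; exact PySem.List.nodup_pyRange_one 1 (sc + 1)
  have hheapify : heapifyB (totals'.items.map (fun kv => (kv.2, kv.1))) = heap'.map projE := by
    refine sorted_unique ((heapify_perm _).trans hperm'.symm) ?_ hpw'
    refine foldl_push_pairwise _ [] (by simp) ?_
    rw [List.nil_append, List.map_map]
    exact hndk'
  -- the heap is never empty while unpinned pairs remain
  have hor : rest' = [] ∨ heap' ≠ [] := by
    by_cases hr : rest' = []
    · exact Or.inl hr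
    · refine Or.inr ?_
      intro h0
      have hpairs : pairs ≠ [] := by
        intro hp0
        rw [hp0] at hsub
        exact hr (List.sublist_nil.mp hsub)
      rw [h0] at hperm'
      have hitems0 : totals'.items.map (fun kv : Int × Int => (kv.2, kv.1)) = [] :=
        (hperm'.symm).eq_nil
      have h1mem : (1:Int) ∈ totals'.keys := by
        rw [hkeys', hkeys0]
        exact PySem.List.mem_pyRange_one.mpr ⟨le_refl 1, by have := hsc hpairs; omega⟩
      have : totals'.items = [] := by simpa using hitems0
      rw [show totals'.keys = totals'.items.map (·.1) from rfl, this] at h1mem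
      cases h1mem
  obtain ⟨h2h, asg2, hA2, hB2⟩ := phase2_agree rest' heap' asg' hor
  have hA : assign_balanced pairs sc pinned = (asg2.items, (drainA h2h PySem.Dict.empty).items) := by
    simp only [assign_balanced, hph1, hA2]
  have hB : assign_balanced_alt pairs sc pinned
      = (asg2.items, (drainB (h2h.map projE) PySem.Dict.empty).items) := by
    simp only [assign_balanced_alt, hsplit, hheapify, hB2]
  rw [hA, hB, drain_proj]
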